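-- pv_equiv track=rewrite | github.com/DragonTops/Puras-M.-R.-difficulties-with-algorithms- | lab11/src/z_function.py | z_search
-- ===== SOURCE A (Python) =====
-- def z_function(s: str) -> list[int]:
--     """
--     Вычисление Z-функции для строки s.
--
--     Args:
--         s: Входная строка
--
--     Returns:
--         Список значений Z-функции
--
--     Сложность: O(n) по времени, O(n) по памяти
--     """
--     n = len(s)
--     z = [0] * n
--
--     # Границы самого правого сегмента [l, r]
--     l, r = 0, 0
--
--     for i in range(1, n):
--         if i <= r:
--             z[i] = min(r - i + 1, z[i - l])
--
--         while i + z[i] < n and s[z[i]] == s[i + z[i]]: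
--             z[i] += 1
--
--         if i + z[i] - 1 > r:
--             l, r = i, i + z[i] - 1
--
--     return z
--
-- def z_search(text: str, pattern: str) -> list[int]:
--     """
--     Поиск всех вхождений pattern в text с использованием Z-функции.
--
--     Args:
--         text: Текст для поиска
--         pattern: Искомый паттерн
--
--     Returns:
--         Список индексов начала вхождений pattern в text
--     """
--     if not pattern:
--         return []
--
--     # Создаем строку pattern + '$' + text
--     combined = pattern + '$' + text
--     z = z_function(combined)
--
--     result = []
--     m = len(pattern)
--
--     for i in range(m + 1, len(combined)):
--         if z[i] == m:
--             result.append(i - m - 1)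
--
--     return result
-- ===== SOURCE B (Python) =====
-- def z_search(text: str, pattern: str) -> list[int]:
--     m = len(pattern)
--     if m == 0:
--         return []
--     return [i for i in range(len(text) - m + 1) if text[i:i+m] == pattern]
-- ===== Notes on version B (the rewrite author's own statement) =====
-- stated objective: simpler
-- what changed: Replaces the Z-function computed over pattern+'$'+text by a direct sliding-window slice comparison over text alone.
-- intended difference: On inputs where the pattern immediately followed by a '$' occurs in text, A silently omits that occurrence (the Z value at it exceeds m because the match extends into A's '$' separator) while B reports it; B's is the intended value since such positions are genuine occurrences. — e.g. on z_search("ab$c", "ab"): A returns [], B returns [0]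
import Mathlib
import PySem

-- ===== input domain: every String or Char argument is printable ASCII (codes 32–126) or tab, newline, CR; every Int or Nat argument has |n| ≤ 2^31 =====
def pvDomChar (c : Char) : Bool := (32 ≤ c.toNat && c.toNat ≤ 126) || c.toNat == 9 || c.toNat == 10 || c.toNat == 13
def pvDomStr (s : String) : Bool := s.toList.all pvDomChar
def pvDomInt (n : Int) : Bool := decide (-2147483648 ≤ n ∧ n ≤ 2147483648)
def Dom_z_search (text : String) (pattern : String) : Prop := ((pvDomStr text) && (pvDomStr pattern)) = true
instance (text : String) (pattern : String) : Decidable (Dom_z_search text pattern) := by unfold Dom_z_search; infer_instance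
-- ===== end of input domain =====

-- B replaces A's Z-function over pattern+'$'+text by a direct sliding-window comparison over
-- text alone (simpler); on texts containing pattern+'$' A misses that occurrence and B reports it (see D_).

-- ===== PORT A =====
-- longest common prefix of two character lists (the quantity A's z-array holds; used by the proofs' spec,
-- not by the ports' code)

-- inner `while i + z[i] < n and s[z[i]] == s[i + z[i]]: z[i] += 1` loop of z_function
-- (indices are in range whenever read, so `getD` is exact for Python's s[k])
def zExtendF (s : List Char) (i : Nat) : Nat → Nat → Nat
  | k, fuel + 1 =>
    if i + k < s.length ∧ s.getD k ' ' = s.getD (i + k) ' ' then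
      zExtendF s i (k + 1) fuel
    else k
  | k, 0 => k

-- `while` runs at most s.length times; the fuel is never exhausted (the guard i+k < s.length bounds it)
def zExtend (s : List Char) (i : Nat) (k : Nat) : Nat :=
  zExtendF s i k (s.length + 1)

-- main `for i in range(1, n)` loop of z_function, state (z, l, r); z-values are naturally ≥ 0,
-- kept as Nat
def zMainF (s : List Char) : Nat → List Nat → Nat → Nat → Nat → List Nat
  | i, z, l, r, fuel + 1 =>
    if i < s.length then
      let z0 := if i ≤ r then min (r - i + 1) (z.getD (i - l) 0) else 0
      let zi := zExtend s i z0
      let z' := z.set i zi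
      if r < i + zi - 1 then zMainF s (i + 1) z' i (i + zi - 1) fuel
      else zMainF s (i + 1) z' l r fuel
    else z
  | _, z, _, _, 0 => z

-- the `for i in range(1, n)` loop runs n-1 times; fuel s.length suffices
def zMain (s : List Char) (i : Nat) (z : List Nat) (l r : Nat) : List Nat :=
  zMainF s i z l r (s.length + 1 - i)

def z_function (s : List Char) : List Nat :=
  zMain s 1 (List.replicate s.length 0) 0 0

def z_search (text : String) (pattern : String) : List Int :=
  if pattern.toList = [] then []
  else
    let combined := pattern.toList ++ '$' :: text.toList
    let z := z_function combined
    let m := pattern.toList.length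
    (List.range' (m + 1) (combined.length - (m + 1))).foldl
      (fun acc i => if z.getD i 0 = m then acc ++ [(i : Int) - (m : Int) - 1] else acc) []

-- ===== PORT B =====
-- text[i:i+m] with 0 ≤ i and i+m clipped at the end is exactly (drop i).take m
def z_search_alt (text : String) (pattern : String) : List Int :=
  let m := pattern.toList.length
  if m = 0 then []
  else
    ((List.range (text.toList.length + 1 - m)).filter
        (fun i => (text.toList.drop i).take m = pattern.toList)).map
      (fun (i : Nat) => (i : Int))

-- ===== PRECONDITION & SPEC =====
-- On inputs whose text contains the pattern immediately followed by '$', A omits that occurrence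
-- (its Z value there exceeds m because the match runs into A's '$' separator) while B reports it;
-- B's value is the intended one, since such positions are genuine occurrences of the pattern.
-- (the `contains '$'` test is implied by the isIn test; it comes first only so the condition is
-- checked by a linear scan on ordinary inputs, which contain no '$')
def D_z_search (text : String) (pattern : String) : Prop :=
  (!pattern.toList.isEmpty && text.toList.contains '$' &&
    PySem.Chars.isIn (pattern.toList ++ ['$']) text.toList) = true
instance (text : String) (pattern : String) : Decidable (D_z_search text pattern) := by
  unfold D_z_search; infer_instance

def Spec_z_search (text : String) (pattern : String) (out : List Int) : Prop :=
  ¬ D_z_search text pattern → out = z_search_alt text pattern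
instance (text : String) (pattern : String) (out : List Int) : Decidable (Spec_z_search text pattern out) := by
  unfold Spec_z_search; infer_instance

def pvDiffWitness_z_search : String × String := ("ab$c", "ab")
def pvDiffWitnessOut_z_search : (List Int) × (List Int) := ([], [0])

-- ===== CLAIM (what is proved, stated in full; the proofs are below) =====
def Claim_unchanged_z_search : Prop := ∀ (text : String) (pattern : String), Dom_z_search text pattern → Spec_z_search text pattern (z_search text pattern)
def Claim_exact_z_search : Prop := ∀ (text : String) (pattern : String), Dom_z_search text pattern → D_z_search text pattern → z_search text pattern ≠ z_search_alt text pattern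
def Claim_changed_z_search : Prop := Dom_z_search (pvDiffWitness_z_search.1) (pvDiffWitness_z_search.2) ∧ D_z_search (pvDiffWitness_z_search.1) (pvDiffWitness_z_search.2) ∧ z_search (pvDiffWitness_z_search.1) (pvDiffWitness_z_search.2) = pvDiffWitnessOut_z_search.1 ∧ z_search_alt (pvDiffWitness_z_search.1) (pvDiffWitness_z_search.2) = pvDiffWitnessOut_z_search.2 ∧ pvDiffWitnessOut_z_search.1 ≠ pvDiffWitnessOut_z_search.2

-- ===== LEMMAS AND PROOFS =====

-- longest common prefix of two character lists: the value z_function's array holds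
def lcpL : List Char → List Char → Nat
  | a :: as, b :: bs => if a = b then lcpL as bs + 1 else 0
  | _, _ => 0

theorem lcpL_le_left : ∀ a b : List Char, lcpL a b ≤ a.length
  | a :: as, b :: bs => by
    by_cases hab : a = b
    · simpa [lcpL, hab] using lcpL_le_left as bs
    · simp [lcpL, hab]
  | [], _ => by simp [lcpL]
  | _ :: _, [] => by simp [lcpL]

theorem lcpL_le_right : ∀ a b : List Char, lcpL a b ≤ b.length
  | a :: as, b :: bs => by
    by_cases hab : a = b
    · simpa [lcpL, hab] using lcpL_le_right as bs
    · simp [lcpL, hab]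
  | [], _ => by simp [lcpL]
  | _ :: _, [] => by simp [lcpL]

theorem lcpL_getD : ∀ (a b : List Char) (j : Nat), j < lcpL a b →
    a.getD j ' ' = b.getD j ' '
  | a :: as, b :: bs, j, h => by
    by_cases hab : a = b
    · simp only [lcpL, if_pos hab] at h
      cases j with
      | zero => simpa using hab
      | succ j => simpa using lcpL_getD as bs j (Nat.lt_of_succ_lt_succ h)
    · simp [lcpL, hab] at h
  | [], _, j, h => by simp [lcpL] at h
  | _ :: _, [], j, h => by simp [lcpL] at h

theorem lcpL_ge : ∀ (a b : List Char) (k : Nat), k ≤ a.length → k ≤ b.length →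
    (∀ j, j < k → a.getD j ' ' = b.getD j ' ') → k ≤ lcpL a b
  | _, _, 0, _, _, _ => Nat.zero_le _
  | a :: as, b :: bs, k + 1, ha, hb, h => by
    have hab : a = b := by simpa using h 0 (Nat.succ_pos _)
    have ih := lcpL_ge as bs k (by simpa using ha) (by simpa using hb)
      (fun j hj => by simpa using h (j + 1) (by omega))
    simp only [lcpL, if_pos hab]
    omega
  | [], _, k + 1, ha, _, _ => by simp at ha
  | _ :: _, [], k + 1, _, hb, _ => by simp at hb

theorem lcpL_stop : ∀ (a b : List Char), lcpL a b < a.length → lcpL a b < b.length →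
    a.getD (lcpL a b) ' ' ≠ b.getD (lcpL a b) ' '
  | a :: as, b :: bs, h1, h2 => by
    by_cases hab : a = b
    · simp only [lcpL, if_pos hab, List.length_cons] at *
      simpa using lcpL_stop as bs (by omega) (by omega)
    · simp [lcpL, hab]
  | [], _, h1, _ => absurd h1 (by simp)
  | _ :: _, [], _, h2 => absurd h2 (by simp [lcpL])

theorem getD_drop (s : List Char) (i j : Nat) :
    (s.drop i).getD j ' ' = s.getD (i + j) ' ' := by
  simp [List.getD_eq_getElem?_getD, List.getElem?_drop]

theorem zExtendF_eq (s : List Char) (i : Nat) (hi : 0 < i) :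
    ∀ (fuel k : Nat), k ≤ lcpL s (s.drop i) → lcpL s (s.drop i) - k ≤ fuel →
      zExtendF s i k fuel = lcpL s (s.drop i)
  | 0, k, hk, hf => by
    simp only [zExtendF]; omega
  | fuel + 1, k, hk, hf => by
    have hL : lcpL s (s.drop i) ≤ s.length - i := by
      simpa using lcpL_le_right s (s.drop i)
    rcases Nat.lt_or_ge k (lcpL s (s.drop i)) with hlt | hge
    · have hcond : i + k < s.length ∧ s.getD k ' ' = s.getD (i + k) ' ' := by
        refine ⟨by omega, ?_⟩
        have := lcpL_getD s (s.drop i) k hlt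
        rwa [getD_drop] at this
      simp only [zExtendF, if_pos hcond]
      exact zExtendF_eq s i hi fuel (k + 1) hlt (by omega)
    · have hk' : k = lcpL s (s.drop i) := by omega
      have hcond : ¬(i + k < s.length ∧ s.getD k ' ' = s.getD (i + k) ' ') := by
        rintro ⟨h1, h2⟩
        have hstop := lcpL_stop s (s.drop i) (by omega) (by simp; omega)
        rw [getD_drop, ← hk'] at hstop
        exact hstop h2
      simp only [zExtendF, if_neg hcond]
      exact hk'

theorem zExtend_eq (s : List Char) (i k : Nat) (hi : 0 < i)
    (hk : k ≤ lcpL s (s.drop i)) : zExtend s i k = lcpL s (s.drop i) := by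
  have := lcpL_le_left s (s.drop i)
  exact zExtendF_eq s i hi (s.length + 1) k hk (by omega)

def ZInv (s : List Char) (i : Nat) (z : List Nat) (l r : Nat) : Prop :=
  z.length = s.length ∧
  (∀ j, 1 ≤ j → j < i → z.getD j 0 = lcpL s (s.drop j)) ∧
  ((l = 0 ∧ r = 0) ∨ (1 ≤ l ∧ l < i ∧ r < s.length ∧ r + 1 ≤ l + lcpL s (s.drop l)))

-- the seed value min(r - i + 1, z[i - l]) taken inside the right-most z-box never exceeds the true z-value
theorem seed_le (s : List Char) (i : Nat) (z : List Nat) (l r : Nat)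
    (hinv : ZInv s i z l r) (hi : i < s.length) (h1 : 1 ≤ i) :
    (if i ≤ r then min (r - i + 1) (z.getD (i - l) 0) else 0) ≤ lcpL s (s.drop i) := by
  by_cases hir : i ≤ r
  · obtain ⟨hlen, hdone, hwin⟩ := hinv
    rcases hwin with ⟨hl0, hr0⟩ | ⟨hl1, hli, hrn, hwin⟩
    · omega
    have hz : z.getD (i - l) 0 = lcpL s (s.drop (i - l)) := hdone (i - l) (by omega) (by omega)
    rw [if_pos hir, hz]
    apply lcpL_ge
    · omega
    · simp; omega
    · intro j hj
      rw [getD_drop]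
      have e1 : s.getD j ' ' = s.getD ((i - l) + j) ' ' := by
        have := lcpL_getD s (s.drop (i - l)) j (by omega)
        rwa [getD_drop] at this
      have e2 : s.getD ((i - l) + j) ' ' = s.getD (i + j) ' ' := by
        have hj2 : (i - l) + j < lcpL s (s.drop l) := by omega
        have := lcpL_getD s (s.drop l) ((i - l) + j) hj2
        rw [getD_drop] at this
        rw [this]
        congr 1
        omega
      rw [e1, e2]
  · rw [if_neg hir]; omega

theorem zMainF_correct (s : List Char) :
    ∀ (fuel i : Nat) (z : List Nat) (l r : Nat), 1 ≤ i → s.length ≤ i + fuel → ZInv s i z l r →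
      ∀ j, 1 ≤ j → j < s.length → (zMainF s i z l r fuel).getD j 0 = lcpL s (s.drop j)
  | 0, i, z, l, r, h1, hfuel, hinv, j, hj1, hj2 => by
    simp only [zMainF]
    exact hinv.2.1 j hj1 (by omega)
  | fuel + 1, i, z, l, r, h1, hfuel, hinv, j, hj1, hj2 => by
    by_cases hi : i < s.length
    · have hseed := seed_le s i z l r hinv hi h1
      have hzi : zExtend s i (if i ≤ r then min (r - i + 1) (z.getD (i - l) 0) else 0) =
          lcpL s (s.drop i) := zExtend_eq s i _ (by omega) hseed
      have hL : lcpL s (s.drop i) ≤ s.length - i := by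
        simpa using lcpL_le_right s (s.drop i)
      obtain ⟨hlen, hdone, hwin⟩ := hinv
      have hinv' : ∀ l' r', ((l' = 0 ∧ r' = 0) ∨
            (1 ≤ l' ∧ l' < i + 1 ∧ r' < s.length ∧ r' + 1 ≤ l' + lcpL s (s.drop l'))) →
          ZInv s (i + 1) (z.set i (lcpL s (s.drop i))) l' r' := by
        intro l' r' hw
        refine ⟨by simpa using hlen, ?_, hw⟩
        intro j hj1 hj2
        rcases Nat.lt_or_ge j i with hji | hji
        · rw [List.getD_eq_getElem?_getD, List.getElem?_set_ne (by omega),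
            ← List.getD_eq_getElem?_getD]
          exact hdone j hj1 hji
        · have hji' : j = i := by omega
          subst hji'
          rw [List.getD_eq_getElem?_getD, List.getElem?_set_self (by omega)]
          rfl
      simp only [zMainF, if_pos hi, hzi]
      split
      · refine zMainF_correct s fuel (i + 1) _ i (i + lcpL s (s.drop i) - 1) (by omega)
          (by omega) (hinv' _ _ ?_) j hj1 hj2
        right
        refine ⟨by omega, by omega, by omega, by omega⟩
      · refine zMainF_correct s fuel (i + 1) _ l r (by omega) (by omega)
          (hinv' _ _ ?_) j hj1 hj2
        rcases hwin with h | h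
        · exact Or.inl h
        · exact Or.inr ⟨h.1, by omega, h.2.2⟩
    · simp only [zMainF, if_neg hi]
      exact hinv.2.1 j hj1 (by omega)

theorem z_function_getD (s : List Char) (j : Nat) (h1 : 1 ≤ j) (h2 : j < s.length) :
    (z_function s).getD j 0 = lcpL s (s.drop j) := by
  refine zMainF_correct s (s.length + 1 - 1) 1 (List.replicate s.length 0) 0 0 le_rfl
    (by omega) ?_ j h1 h2
  exact ⟨by simp, fun j hj1 hj2 => by omega, Or.inl ⟨rfl, rfl⟩⟩

theorem le_lcpL_iff : ∀ (m : Nat) (a b : List Char), m ≤ a.length →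
    (m ≤ lcpL a b ↔ b.take m = a.take m)
  | 0, a, b, _ => by simp
  | m + 1, a :: as, b :: bs, hm => by
    by_cases hab : a = b
    · subst hab
      rw [show lcpL (a :: as) (a :: bs) = lcpL as bs + 1 from by simp [lcpL]]
      simp only [List.take_succ_cons, List.cons.injEq, true_and, Nat.add_le_add_iff_right]
      exact le_lcpL_iff m as bs (by simpa using hm)
    · simp only [lcpL, if_neg hab, List.take_succ_cons, List.cons.injEq]
      constructor
      · omega
      · rintro ⟨h, -⟩; exact absurd h.symm hab
  | m + 1, [], b, hm => by simp at hm
  | m + 1, a :: as, [], hm => by simp [lcpL]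

theorem lcpL_combined (p t x : List Char) :
    (lcpL (p ++ '$' :: t) x = p.length ↔
      x.take p.length = p ∧ x.take (p.length + 1) ≠ p ++ ['$']) := by
  have hc1 : (p ++ '$' :: t).take p.length = p := List.take_left
  have hc2 : (p ++ '$' :: t).take (p.length + 1) = p ++ ['$'] := by
    simpa using List.take_length_add_append (l₁ := p) (l₂ := '$' :: t) 1
  have h1 := le_lcpL_iff p.length (p ++ '$' :: t) x (by simp)
  have h2 := le_lcpL_iff (p.length + 1) (p ++ '$' :: t) x (by simp)
  rw [hc1] at h1
  rw [hc2] at h2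
  constructor
  · exact fun h => ⟨h1.mp (by omega), fun hx => by have := h2.mpr hx; omega⟩
  · rintro ⟨hx1, hx2⟩
    have hle := h1.mpr hx1
    have hlt : ¬ (p.length + 1 ≤ lcpL (p ++ '$' :: t) x) := fun hle2 => hx2 (h2.mp hle2)
    omega

-- z_function of pattern ++ '$' ++ text, read at position (m+1)+x, detects an occurrence at x:
-- it equals m exactly when text matches at x and the match is not followed by A's '$' separator
theorem zval_iff' (p t : List Char) (x : Nat) (hx : x < t.length) :
    ((z_function (p ++ '$' :: t)).getD (p.length + 1 + x) 0 = p.length ↔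
      ((t.drop x).take p.length = p ∧ (t.drop x).take (p.length + 1) ≠ p ++ ['$'])) := by
  have hdrop : (p ++ '$' :: t).drop (p.length + 1 + x) = t.drop x := by
    rw [show p ++ '$' :: t = (p ++ ['$']) ++ t by simp,
      show p.length + 1 + x = (p ++ ['$']).length + x by simp]
    exact List.drop_length_add_append x
  have hz := z_function_getD (p ++ '$' :: t) (p.length + 1 + x) (by omega) (by simp; omega)
  rw [hz, hdrop, lcpL_combined]

theorem zval_iff (p t : List Char) (hD : ¬ (p ++ ['$']) <:+: t)
    (x : Nat) (hx : x < t.length) :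
    ((z_function (p ++ '$' :: t)).getD (p.length + 1 + x) 0 = p.length ↔
      (t.drop x).take p.length = p) := by
  rw [zval_iff' p t x hx]
  constructor
  · exact fun h => h.1
  · intro h
    refine ⟨h, fun hcon => hD ?_⟩
    rw [← hcon]
    exact ((t.drop x).take_prefix _).isInfix.trans (t.drop_suffix x).isInfix

-- A's collection loop is a filter-and-map (bridging the propositional `if` to foldl_append_if's Bool test)
theorem collect_eq (zz : List Nat) (mm : Nat) (L : List Nat) :
    L.foldl (fun acc i => if zz.getD i 0 = mm then acc ++ [(i : Int) - (mm : Int) - 1] else acc) [] =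
      (L.filter (fun i => zz.getD i 0 == mm)).map (fun (i : Nat) => (i : Int) - (mm : Int) - 1) := by
  rw [show (fun (acc : List Int) (i : Nat) =>
        if zz.getD i 0 = mm then acc ++ [(i : Int) - (mm : Int) - 1] else acc) =
      (fun (acc : List Int) (i : Nat) =>
        if (fun i => zz.getD i 0 == mm) i = true then acc ++ [(i : Int) - (mm : Int) - 1] else acc) from by
    funext acc i
    simp only [beq_iff_eq]]
  exact PySem.List.foldl_append_if (fun i => zz.getD i 0 == mm)
    (fun (i : Nat) => (i : Int) - (mm : Int) - 1) L ([] : List Int)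

-- the two programs agree, stated on the underlying character lists
theorem main_lists (p t : List Char) (hp : p ≠ []) (hD : ¬ (p ++ ['$']) <:+: t) :
    (List.range' (p.length + 1) ((p ++ '$' :: t).length - (p.length + 1))).foldl
      (fun acc i => if (z_function (p ++ '$' :: t)).getD i 0 = p.length
        then acc ++ [(i : Int) - (p.length : Int) - 1] else acc) [] =
    ((List.range (t.length + 1 - p.length)).filter
        (fun i => (t.drop i).take p.length = p)).map (fun (i : Nat) => (i : Int)) := by
  have hm1 : 1 ≤ p.length := List.length_pos_iff.mpr hp
  have hlen : (p ++ '$' :: t).length - (p.length + 1) = t.length := by simp; omega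
  rw [hlen, collect_eq, List.range'_eq_map_range, List.filter_map, List.map_map]
  have hpt : ∀ x ∈ List.range t.length,
      ((fun i => (z_function (p ++ '$' :: t)).getD i 0 == p.length) ∘ (p.length + 1 + ·)) x =
        (fun i => decide ((t.drop i).take p.length = p)) x := by
    intro x hx
    have hiff := zval_iff p t hD x (by simpa using hx)
    simp only [Function.comp_apply]
    rw [Bool.eq_iff_iff]
    simpa using hiff
  rw [List.filter_congr hpt]
  have hranges : (List.range t.length).filter (fun i => decide ((t.drop i).take p.length = p)) =
      (List.range (t.length + 1 - p.length)).filter (fun i => decide ((t.drop i).take p.length = p)) := by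
    have hsplit : t.length = (t.length + 1 - p.length) + (t.length - (t.length + 1 - p.length)) := by
      omega
    rw [show List.range t.length = List.range ((t.length + 1 - p.length) +
          (t.length - (t.length + 1 - p.length))) by rw [← hsplit],
      List.range_add, List.filter_append]
    have hnil : (List.filter (fun i => decide ((t.drop i).take p.length = p))
        ((List.range (t.length - (t.length + 1 - p.length))).map ((t.length + 1 - p.length) + ·))) = [] := by
      apply List.filter_eq_nil_iff.mpr
      intro a ha
      simp only [List.mem_map, List.mem_range] at ha
      obtain ⟨k, hk, rfl⟩ := ha
      simp only [decide_eq_true_eq]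
      intro hcon
      have := congrArg List.length hcon
      simp only [List.length_take, List.length_drop] at this
      omega
    rw [hnil, List.append_nil]
  rw [hranges]
  apply List.map_congr_left
  intro x hx
  simp only [Function.comp_apply]
  push_cast
  ring

-- ===== VERDICT (by name: the statement is the Claim_ definition above) =====
theorem z_search_spec : Claim_unchanged_z_search := by
  intro text pattern _ hnd
  by_cases hp : pattern.toList = []
  · simp [z_search, z_search_alt, hp]
  · have hD' : ¬ (pattern.toList ++ ['$']) <:+: text.toList := by
      intro h
      apply hnd
      simp only [D_z_search, Bool.and_eq_true, PySem.Chars.isIn_iff_infix, List.contains_iff_mem,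
        Bool.not_eq_eq_eq_not, Bool.not_true, List.isEmpty_eq_false_iff, ne_eq]
      exact ⟨⟨hp, h.mem (by simp)⟩, h⟩
    have hm0 : ¬ pattern.toList.length = 0 := by simpa using hp
    simp only [z_search, z_search_alt, if_neg hp, if_neg hm0]
    exact main_lists _ _ hp hD'


theorem z_search_changed : Claim_changed_z_search := by
  unfold Claim_changed_z_search; decide

theorem z_search_tight : Claim_exact_z_search := by
  intro text pattern _ hd heq
  simp only [D_z_search, Bool.and_eq_true, PySem.Chars.isIn_iff_infix, List.contains_iff_mem,
    Bool.not_eq_eq_eq_not, Bool.not_true, List.isEmpty_eq_false_iff, ne_eq] at hd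
  obtain ⟨⟨hp, -⟩, hinf⟩ := hd
  obtain ⟨u, v, huv⟩ := hinf
  have hm0 : ¬ pattern.toList.length = 0 := by simpa using hp
  have hlen := congrArg List.length huv
  simp only [List.length_append, List.length_singleton] at hlen
  have hclen : (pattern.toList ++ '$' :: text.toList).length =
      pattern.toList.length + 1 + text.toList.length := by
    simp only [List.length_append, List.length_cons]
    omega
  have hdropj : text.toList.drop u.length = (pattern.toList ++ ['$']) ++ v := by
    rw [← huv, List.append_assoc, List.drop_left]
  have hQ : (text.toList.drop u.length).take pattern.toList.length = pattern.toList := by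
    rw [hdropj, List.append_assoc]
    exact List.take_left
  have hR : (text.toList.drop u.length).take (pattern.toList.length + 1) =
      pattern.toList ++ ['$'] := by
    rw [hdropj]
    simpa using List.take_left (l₁ := pattern.toList ++ ['$']) (l₂ := v)
  have hmemB : ((u.length : Nat) : Int) ∈ z_search_alt text pattern := by
    simp only [z_search_alt, if_neg hm0, List.mem_map, List.mem_filter, List.mem_range,
      decide_eq_true_eq]
    exact ⟨u.length, ⟨by omega, hQ⟩, rfl⟩
  rw [← heq] at hmemB
  simp only [z_search, if_neg hp] at hmemB
  rw [collect_eq] at hmemB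
  simp only [List.mem_map, List.mem_filter, List.mem_range'_1, beq_iff_eq] at hmemB
  obtain ⟨i, ⟨⟨hi1, hi2⟩, hiz⟩, hEq⟩ := hmemB
  have hieq : i = pattern.toList.length + 1 + u.length := by omega
  rw [hieq] at hiz
  have hx : u.length < text.toList.length := by omega
  exact ((zval_iff' pattern.toList text.toList u.length hx).mp hiz).2 hR
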